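-- pv_equiv track=rewrite | github.com/adeteyah/music_recommender_system | scripts/rs_optimized/o_cf.py | calculate_relationship
-- ===== SOURCE A (Python) =====
-- def calculate_relationship(ids, playlist_tracks):
--     relationships = {}
--     for i in range(len(ids)):
--         for j in range(i + 1, len(ids)):
--             id1, id2 = ids[i], ids[j]
--             common_playlists = 0
--             for tracks in playlist_tracks:
--                 if id1 in tracks and id2 in tracks:
--                     common_playlists += 1
--             if common_playlists >= 2:
--                 relationship = 'High'
--             elif common_playlists == 1:
--                 relationship = 'Medium'
--             else:
--                 relationship = 'Low'
--             relationships[(id1, id2)] = relationship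
--     return relationships
-- ===== SOURCE B (Python) =====
-- def calculate_relationship(ids, playlist_tracks):
--     # Per-playlist inverted counting: count co-occurrences once per playlist
--     # instead of scanning every playlist for every pair.
--     distinct = list(dict.fromkeys(ids))
--     counts = {}
--     for tracks in playlist_tracks:
--         ts = set(tracks)
--         present = [x for x in distinct if x in ts]
--         keys = [(a, b) for a in present for b in present if a <= b]
--         for k in keys:
--             counts[k] = counts.get(k, 0) + 1
--     rel = {}
--     n = len(ids)
--     for i in range(n):
--         for j in range(i + 1, n):
--             a, b = ids[i], ids[j]
--             c = counts.get((a, b) if a <= b else (b, a), 0)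
--             rel[(a, b)] = 'High' if c >= 2 else ('Medium' if c == 1 else 'Low')
--     return rel
-- ===== Notes on version B (the rewrite author's own statement) =====
-- stated objective: faster
-- what changed: Replaces the per-pair scan of all playlists (membership test over each playlist's tracks for every pair) with a per-playlist inverted pass that increments a co-occurrence counter once per playlist, then labels each pair by a single dictionary lookup.
import Mathlib
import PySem

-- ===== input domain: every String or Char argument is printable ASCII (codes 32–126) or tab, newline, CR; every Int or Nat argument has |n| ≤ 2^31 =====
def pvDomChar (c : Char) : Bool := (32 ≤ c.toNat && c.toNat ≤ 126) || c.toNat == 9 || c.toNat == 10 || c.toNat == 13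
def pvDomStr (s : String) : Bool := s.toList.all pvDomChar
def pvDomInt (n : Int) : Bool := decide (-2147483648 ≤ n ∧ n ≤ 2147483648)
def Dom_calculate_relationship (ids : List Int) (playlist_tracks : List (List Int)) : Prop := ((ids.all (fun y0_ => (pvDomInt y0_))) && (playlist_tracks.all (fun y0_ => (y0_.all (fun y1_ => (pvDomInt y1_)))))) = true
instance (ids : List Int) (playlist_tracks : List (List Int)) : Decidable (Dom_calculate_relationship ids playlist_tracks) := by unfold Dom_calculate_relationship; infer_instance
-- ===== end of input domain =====

-- B replaces A's per-pair scan of every playlist by one inverted pass per playlist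
-- that increments a co-occurrence counter, then labels each pair by one lookup (faster in a timing run).

-- ===== PORT A =====
def calculate_relationship (ids : List Int) (playlist_tracks : List (List Int)) : List (Int × Int × String) :=
  let relationships : PySem.Dict (Int × Int) String :=
    (PySem.List.pyRange 0 (ids.length : Int) 1).foldl (fun relationships i =>
      (PySem.List.pyRange (i + 1) (ids.length : Int) 1).foldl (fun relationships j =>
        let id1 := PySem.List.pyGetD ids i 0
        let id2 := PySem.List.pyGetD ids j 0
        let common_playlists : Int := playlist_tracks.foldl
          (fun c tracks => if tracks.contains id1 && tracks.contains id2 then c + 1 else c) 0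
        let relationship :=
          if common_playlists ≥ 2 then "High"
          else if common_playlists = 1 then "Medium"
          else "Low"
        relationships.insert (id1, id2) relationship) relationships)
      PySem.Dict.empty
  relationships.items.map (fun p => (p.1.1, p.1.2, p.2))

-- ===== PORT B =====
def calculate_relationship_alt (ids : List Int) (playlist_tracks : List (List Int)) : List (Int × Int × String) :=
  let distinct : List Int := PySem.List.dedup ids
  let counts : PySem.Dict (Int × Int) Int :=
    playlist_tracks.foldl (fun counts tracks =>
      let ts : PySem.Set Int := PySem.Set.ofList tracks
      let present : List Int := distinct.filter (fun x => PySem.Set.contains ts x)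
      let keys : List (Int × Int) :=
        present.flatMap (fun a => (present.filter (fun b => decide (a ≤ b))).map (fun b => (a, b)))
      keys.foldl (fun counts k => counts.insert k (counts.getD k 0 + 1)) counts)
      PySem.Dict.empty
  let rel : PySem.Dict (Int × Int) String :=
    (PySem.List.pyRange 0 (ids.length : Int) 1).foldl (fun rel i =>
      (PySem.List.pyRange (i + 1) (ids.length : Int) 1).foldl (fun rel j =>
        let a := PySem.List.pyGetD ids i 0
        let b := PySem.List.pyGetD ids j 0
        let c := counts.getD (if a ≤ b then (a, b) else (b, a)) 0
        rel.insert (a, b) (if c ≥ 2 then "High" else if c = 1 then "Medium" else "Low")) rel)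
      PySem.Dict.empty
  rel.items.map (fun p => (p.1.1, p.1.2, p.2))

-- ===== PRECONDITION & SPEC =====
def Spec_calculate_relationship (ids : List Int) (playlist_tracks : List (List Int)) (out : List (Int × Int × String)) : Prop := out = calculate_relationship_alt ids playlist_tracks
instance (ids : List Int) (playlist_tracks : List (List Int)) (out : List (Int × Int × String)) : Decidable (Spec_calculate_relationship ids playlist_tracks out) := by unfold Spec_calculate_relationship; infer_instance

-- ===== CLAIM (what is proved, stated in full; the proofs are below) =====
def Claim_equal_calculate_relationship : Prop := ∀ (ids : List Int) (playlist_tracks : List (List Int)), Dom_calculate_relationship ids playlist_tracks → Spec_calculate_relationship ids playlist_tracks (calculate_relationship ids playlist_tracks)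

-- ===== LEMMAS AND PROOFS =====

-- counting a pair in a mapped list: only the matching first component contributes
lemma count_map_pair (a x y : Int) (l : List Int) :
    (l.map (fun b => (a, b))).count (x, y) = if a = x then l.count y else 0 := by
  induction l with
  | nil => simp
  | cons h t ih =>
    simp only [List.map_cons, List.count_cons, ih]
    by_cases hax : a = x <;> by_cases hhy : h = y <;>
      simp [hax, hhy, Prod.ext_iff]

-- the comprehension [(a,b) for a in p for b in p if a <= b] counts a sorted pair exactly once
-- when both elements are present (p, q nodup)
lemma count_keys (p q : List Int) (x y : Int) (hxy : x ≤ y) (hp : p.Nodup) (hq : q.Nodup) :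
    (p.flatMap (fun a => (q.filter (fun b => decide (a ≤ b))).map (fun b => (a, b)))).count (x, y)
      = if x ∈ p ∧ y ∈ q then 1 else 0 := by
  induction p with
  | nil => simp
  | cons h t ih =>
    have hnd := List.nodup_cons.mp hp
    simp only [List.flatMap_cons, List.count_append, count_map_pair, ih hnd.2]
    by_cases hhx : h = x
    · subst hhx
      have hcf : List.count y (q.filter (fun b => decide (h ≤ b))) = List.count y q :=
        List.count_filter (by simpa using hxy)
      by_cases hyq : y ∈ q
      · have h1 : q.count y = 1 := by
          have := List.nodup_iff_count_le_one.mp hq y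
          have := List.count_pos_iff.mpr hyq
          omega
        simp [hcf, hyq, h1, hnd.1]
      · simp [hcf, hyq, List.count_eq_zero.mpr hyq]
    · have hxh : ¬ x = h := fun e => hhx e.symm
      simp [if_neg hhx, List.mem_cons, hxh]

-- B's counter after all playlists holds, at a sorted key of elements of ids,
-- exactly the number of playlists containing both
lemma counts_getD (ids : List Int) (x y : Int) (hxy : x ≤ y) (hx : x ∈ ids) (hy : y ∈ ids) :
    ∀ (pts : List (List Int)) (d : PySem.Dict (Int × Int) Int),
    (pts.foldl (fun counts tracks =>
        (((PySem.List.dedup ids).filter (fun z => PySem.Set.contains (PySem.Set.ofList tracks) z)).flatMap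
            (fun a => ((((PySem.List.dedup ids).filter (fun z => PySem.Set.contains (PySem.Set.ofList tracks) z)).filter
                (fun b => decide (a ≤ b))).map (fun b => (a, b))))).foldl
          (fun counts k => counts.insert k (counts.getD k 0 + 1)) counts) d).getD (x, y) 0
      = d.getD (x, y) 0 + (pts.countP (fun t => t.contains x && t.contains y) : Int) := by
  intro pts
  induction pts with
  | nil => simp
  | cons t ts ih =>
    intro d
    simp only [List.foldl_cons, ih, PySem.Dict.getD_foldl_insert_add_one, List.countP_cons]
    have hnp : ((PySem.List.dedup ids).filter
        (fun z => PySem.Set.contains (PySem.Set.ofList t) z)).Nodup :=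
      (PySem.List.nodup_dedup ids).filter _
    rw [count_keys _ _ _ _ hxy hnp hnp]
    by_cases hxm : x ∈ t <;> by_cases hym : y ∈ t <;>
      simp [List.mem_filter, hx, hy, PySem.Set.contains, PySem.Set.mem_ofList, hxm, hym] <;> omega

-- the co-occurrence number both programs use agrees for any two elements of ids
lemma label_eq (ids : List Int) (pts : List (List Int)) (a b : Int)
    (ha : a ∈ ids) (hb : b ∈ ids) :
    (pts.foldl (fun counts tracks =>
        (((PySem.List.dedup ids).filter (fun z => PySem.Set.contains (PySem.Set.ofList tracks) z)).flatMap
            (fun x => ((((PySem.List.dedup ids).filter (fun z => PySem.Set.contains (PySem.Set.ofList tracks) z)).filter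
                (fun y => decide (x ≤ y))).map (fun y => (x, y))))).foldl
          (fun counts k => counts.insert k (counts.getD k 0 + 1)) counts) PySem.Dict.empty).getD
      (if a ≤ b then (a, b) else (b, a)) 0
      = pts.foldl (fun c tracks => if tracks.contains a && tracks.contains b then c + 1 else c) (0 : Int) := by
  rw [PySem.List.foldl_if_add_one]
  by_cases hab : a ≤ b
  · rw [if_pos hab, counts_getD ids a b hab ha hb pts PySem.Dict.empty]
    simp
  · have hba : b ≤ a := le_of_not_ge hab
    rw [if_neg hab, counts_getD ids b a hba hb ha pts PySem.Dict.empty]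
    simp only [PySem.Dict.getD_empty, zero_add, Int.natCast_inj]
    exact List.countP_congr (fun t _ => by simp [Bool.and_comm])

-- ===== VERDICT (by name: the statement is the Claim_ definition above) =====
theorem calculate_relationship_spec : Claim_equal_calculate_relationship := by
  intro ids pts _
  unfold Spec_calculate_relationship calculate_relationship calculate_relationship_alt
  simp only []
  congr 1
  congr 1
  apply PySem.List.foldl_congr_mem
  intro rel i hi
  apply PySem.List.foldl_congr_mem
  intro rel j hj
  have hi' := PySem.List.mem_pyRange_one.mp hi
  have hj' := PySem.List.mem_pyRange_one.mp hj
  have ha : PySem.List.pyGetD ids i 0 ∈ ids := by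
    rw [PySem.List.pyGetD_eq_getElem ids 0 (by omega) (by omega)]
    exact List.getElem_mem _
  have hb : PySem.List.pyGetD ids j 0 ∈ ids := by
    rw [PySem.List.pyGetD_eq_getElem ids 0 (by omega) (by omega)]
    exact List.getElem_mem _
  rw [label_eq ids pts _ _ ha hb]
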